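-- pv_equiv track=rewrite | github.com/mikeberl/advent-of-code-24 | day_12/12_2.py | find_cost
-- ===== SOURCE A (Python) =====
-- def count_consecutive_block_series(blocks, direction):
--     groups = {}
--
--     for block in blocks:
--         key = block[0] if direction == 'x' else block[1]
--         if key not in groups:
--             groups[key] = set()
--         groups[key].add(block[1] if direction == 'x' else block[0])
--
--     consecutive_series = 0
--
--     for key, values in groups.items():
--         sorted_values = sorted(list(values))
--
--         i = 0
--         while i < len(sorted_values):
--             consecutive_series += 1
--
--             current = sorted_values[i]
--             while i < len(sorted_values) and sorted_values[i] == current: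
--                 i += 1
--                 current += 1
--
--     return consecutive_series
--
-- def get_direction(dx, dy):
--     if dx == -1 and dy == 0:
--         return 'up'
--     elif dx == 1 and dy == 0:
--         return 'down'
--     elif dx == 0 and dy == -1:
--         return 'right'
--     elif dx == 0 and dy == 1:
--         return 'left'
--
-- def find_cost(grid):
--
--     sum = 0
--     cols = len(grid)
--     lines = len(grid[0])
--     assigned_blocks = [] # for blocks that are already assigned to a region
--     for c in range(cols):
--         for l in range(lines):
--             if (c, l) not in assigned_blocks:
--                 assigned_blocks.append((c, l))
--                 region = [(c, l)]
--                 key = grid[c][l]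
--                 end_region = []
--                 while region:
--                     x, y = region.pop(0)
--                     end_region.append((x, y))
--
--                     for dx, dy in [(-1, 0), (1, 0), (0, -1), (0, 1)]:
--                         nx, ny = x + dx, y + dy
--                         if 0 <= nx < cols and 0 <= ny < lines:
--                             if grid[nx][ny] == key and (nx, ny) not in assigned_blocks:
--                                 assigned_blocks.append((nx, ny))
--                                 region.append((nx, ny))
--
--                 area = len(end_region)
--
--                 external_blocks = {
--                     'up': [],
--                     'down': [],
--                     'left': [],
--                     'right': []
--                 } # to find the externality direction of every block
--                 while end_region:
--                     x, y = end_region.pop(0)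
--                     directions = []
--                     for dx, dy in [(-1, 0), (1, 0), (0, -1), (0, 1)]:
--                         nx, ny = x + dx, y + dy
--                         if nx < 0 or nx >= cols or ny < 0 or ny >= lines:
--                             directions.append(get_direction(dx, dy))
--                         elif 0 <= nx < cols and 0 <= ny < lines:
--                             if grid[nx][ny] != key:
--                                 directions.append(get_direction(dx, dy))
--
--                     for direction in directions:
--                         if (x, y) not in external_blocks[direction]:
--                             external_blocks[direction].append((x, y))
--
--                 sides = ( count_consecutive_block_series(external_blocks['up'], 'x')
--                     + count_consecutive_block_series(external_blocks['down'], 'x')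
--                     + count_consecutive_block_series(external_blocks['right'], 'y')
--                     + count_consecutive_block_series(external_blocks['left'], 'y')
--                 )
--                 sum += area * sides
--     return sum
-- ===== SOURCE B (Python) =====
-- def find_cost(grid):
--     total = 0
--     cols = len(grid)
--     lines = len(grid[0])
--
--     def blocked(x, y, key):
--         # outside the grid, or a different letter
--         return not (0 <= x < cols and 0 <= y < lines) or grid[x][y] != key
--
--     assigned = set()
--     for c in range(cols):
--         for l in range(lines):
--             if (c, l) in assigned:
--                 continue
--             key = grid[c][l]
--             assigned.add((c, l))
--             queue = [(c, l)]
--             cells = set()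
--             while queue:
--                 x, y = queue.pop(0)
--                 cells.add((x, y))
--                 for dx, dy in ((-1, 0), (1, 0), (0, -1), (0, 1)):
--                     nx, ny = x + dx, y + dy
--                     if 0 <= nx < cols and 0 <= ny < lines \
--                             and grid[nx][ny] == key and (nx, ny) not in assigned:
--                         assigned.add((nx, ny))
--                         queue.append((nx, ny))
--
--             area = len(cells)
--             # sides = number of straight fence segments; count each segment
--             # once, at its first cell (the cell whose predecessor along the
--             # segment is not part of the region or not exposed the same way)
--             sides = 0
--             for (x, y) in cells:
--                 for dx, dy in ((-1, 0), (1, 0), (0, -1), (0, 1)):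
--                     if blocked(x + dx, y + dy, key):
--                         px, py = (x, y - 1) if dy == 0 else (x - 1, y)
--                         if not ((px, py) in cells and blocked(px + dx, py + dy, key)):
--                             sides += 1
--             total += area * sides
--     return total
-- ===== Notes on version B (the rewrite author's own statement) =====
-- stated objective: faster
-- what changed: Replaces the per-direction external-block grouping plus run-length side counting (and the O(n) list membership for visited cells) with a single pass over each region that counts every straight fence segment once at its first cell, using hash sets for region/visited membership.
import Mathlib
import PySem

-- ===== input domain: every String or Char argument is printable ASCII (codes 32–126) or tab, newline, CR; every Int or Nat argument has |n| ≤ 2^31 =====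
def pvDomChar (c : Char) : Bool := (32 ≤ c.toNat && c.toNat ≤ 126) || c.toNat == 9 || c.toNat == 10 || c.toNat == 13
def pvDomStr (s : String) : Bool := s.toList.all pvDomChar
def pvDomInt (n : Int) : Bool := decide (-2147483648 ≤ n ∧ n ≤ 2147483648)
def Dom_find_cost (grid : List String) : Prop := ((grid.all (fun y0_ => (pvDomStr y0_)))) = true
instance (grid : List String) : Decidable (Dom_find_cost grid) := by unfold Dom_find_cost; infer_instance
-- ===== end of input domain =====

-- B replaces A's external-block grouping and run-length side counting with counting each
-- fence segment once at its first cell, and uses sets instead of list membership: faster.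

-- ===== PORT A =====

-- grid[x][y] (both indices known in range under Pre_; Option equality mirrors char equality there)
def gIdx (grid : List String) (x y : Int) : Option Char :=
  (PySem.List.pyGet? grid x).bind (fun s => PySem.Str.pyGet? s y)

def dirs4 : List (Int × Int) := [(-1, 0), (1, 0), (0, -1), (0, 1)]

def get_direction (dx dy : Int) : String :=
  if dx == -1 && dy == 0 then "up"
  else if dx == 1 && dy == 0 then "down"
  else if dx == 0 && dy == -1 then "right"
  else if dx == 0 && dy == 1 then "left"
  else ""  -- Python returns None here; unreachable for the four calls made

-- one neighbour check of A's flood fill: state (assigned, queue)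
def nbrA (grid : List String) (cols lines : Int) (key : Option Char) (x y : Int)
    (st : List (Int × Int) × List (Int × Int)) (d : Int × Int) :
    List (Int × Int) × List (Int × Int) :=
  let nx := x + d.1
  let ny := y + d.2
  if 0 ≤ nx ∧ nx < cols ∧ 0 ≤ ny ∧ ny < lines then
    if gIdx grid nx ny == key ∧ (nx, ny) ∉ st.1 then
      (st.1 ++ [(nx, ny)], st.2 ++ [(nx, ny)])
    else st
  else st

-- A's 'while region:' loop (fuel only makes the while-loop total; one unit per pop)
def bfsA (grid : List String) (cols lines : Int) (key : Option Char) :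
    Nat → List (Int × Int) → List (Int × Int) → List (Int × Int) →
    List (Int × Int) × List (Int × Int)
  | 0, _, endr, assigned => (endr, assigned)
  | _ + 1, [], endr, assigned => (endr, assigned)
  | fuel + 1, c :: rest, endr, assigned =>
    let st := dirs4.foldl (nbrA grid cols lines key c.1 c.2) (assigned, rest)
    bfsA grid cols lines key fuel st.2 (endr ++ [c]) st.1

def eb0 : PySem.Dict String (List (Int × Int)) :=
  PySem.Dict.ofList [("up", []), ("down", []), ("left", []), ("right", [])]

-- the 'directions' list collected for one block of A's 'while end_region:' loop
def externDirections (grid : List String) (cols lines : Int) (key : Option Char)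
    (c : Int × Int) : List String :=
  dirs4.foldl (fun dirs d =>
    let nx := c.1 + d.1
    let ny := c.2 + d.2
    if nx < 0 ∨ nx ≥ cols ∨ ny < 0 ∨ ny ≥ lines then dirs ++ [get_direction d.1 d.2]
    else if 0 ≤ nx ∧ nx < cols ∧ 0 ≤ ny ∧ ny < lines then
      (if gIdx grid nx ny ≠ key then dirs ++ [get_direction d.1 d.2] else dirs)
    else dirs) []

-- one iteration of that loop: record the block under each collected direction
def externCell (grid : List String) (cols lines : Int) (key : Option Char)
    (eb : PySem.Dict String (List (Int × Int))) (c : Int × Int) :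
    PySem.Dict String (List (Int × Int)) :=
  (externDirections grid cols lines key c).foldl (fun eb dir =>
    if c ∈ eb.getD dir [] then eb else eb.insert dir (eb.getD dir [] ++ [c])) eb

-- A's 'while end_region:' loop building external_blocks
def externLoop (grid : List String) (cols lines : Int) (key : Option Char) :
    List (Int × Int) → PySem.Dict String (List (Int × Int)) →
    PySem.Dict String (List (Int × Int))
  | [], eb => eb
  | c :: rest, eb =>
    externLoop grid cols lines key rest (externCell grid cols lines key eb c)


def skipRun (cur : Int) : List Int → List Int
  | [] => []
  | v :: rest => if v == cur then skipRun (cur + 1) rest else v :: rest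

theorem skipRun_len (cur : Int) (s : List Int) : (skipRun cur s).length ≤ s.length := by
  induction s generalizing cur with
  | nil => simp [skipRun]
  | cons v rest ih =>
    simp only [skipRun]
    split
    · exact Nat.le_succ_of_le (ih _)
    · exact Nat.le_refl _

-- the pair of while loops over one sorted group
def runCount : List Int → Int
  | [] => 0
  | v :: rest => 1 + runCount (skipRun (v + 1) rest)
termination_by s => s.length
decreasing_by simpa using Nat.lt_succ_of_le (skipRun_len (v + 1) rest)

def ccbsStep (dir : String) (groups : PySem.Dict Int (PySem.Set Int)) (b : Int × Int) :
    PySem.Dict Int (PySem.Set Int) :=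
  let key := if dir == "x" then b.1 else b.2
  let groups := if groups.contains key then groups else groups.insert key PySem.Set.empty
  groups.insert key (PySem.Set.add (groups.getD key PySem.Set.empty)
    (if dir == "x" then b.2 else b.1))

def count_consecutive_block_series (blocks : List (Int × Int)) (dir : String) : Int :=
  let groups := blocks.foldl (ccbsStep dir) PySem.Dict.empty
  groups.items.foldl (fun acc kv =>
    acc + runCount (PySem.List.sorted kv.2 (fun x => x) false)) 0

def find_cost (grid : List String) : Int :=
  let cols : Int := grid.length
  let lines : Int := match PySem.List.pyGet? grid 0 with
    | some s => PySem.Str.len s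
    | none => 0   -- Python raises IndexError on an empty grid: excluded by Pre_
  let fuel : Nat := cols.toNat * lines.toNat + 2
  let st := (PySem.List.pyRange 0 cols 1).foldl (fun st c =>
    (PySem.List.pyRange 0 lines 1).foldl (fun st l =>
      if (c, l) ∈ st.1 then st
      else
        let assigned := st.1 ++ [(c, l)]
        let key := gIdx grid c l
        let (endr, assigned) := bfsA grid cols lines key fuel [(c, l)] [] assigned
        let area : Int := endr.length
        let eb := externLoop grid cols lines key endr eb0
        let sides := count_consecutive_block_series (eb.getD "up" []) "x"
          + count_consecutive_block_series (eb.getD "down" []) "x"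
          + count_consecutive_block_series (eb.getD "right" []) "y"
          + count_consecutive_block_series (eb.getD "left" []) "y"
        (assigned, st.2 + area * sides)) st) (([] : List (Int × Int)), (0 : Int))
  st.2

-- ===== PORT B =====

def blockedB (grid : List String) (cols lines : Int) (x y : Int) (key : Option Char) : Bool :=
  !(0 ≤ x ∧ x < cols ∧ 0 ≤ y ∧ y < lines : Bool) || (gIdx grid x y != key)

def nbrB (grid : List String) (cols lines : Int) (key : Option Char) (x y : Int)
    (st : PySem.Set (Int × Int) × List (Int × Int)) (d : Int × Int) :
    PySem.Set (Int × Int) × List (Int × Int) :=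
  let nx := x + d.1
  let ny := y + d.2
  if 0 ≤ nx ∧ nx < cols ∧ 0 ≤ ny ∧ ny < lines then
    if gIdx grid nx ny == key ∧ ¬ PySem.Set.contains st.1 (nx, ny) then
      (PySem.Set.add st.1 (nx, ny), st.2 ++ [(nx, ny)])
    else st
  else st

def bfsB (grid : List String) (cols lines : Int) (key : Option Char) :
    Nat → List (Int × Int) → PySem.Set (Int × Int) → PySem.Set (Int × Int) →
    PySem.Set (Int × Int) × PySem.Set (Int × Int)
  | 0, _, cells, assigned => (cells, assigned)
  | _ + 1, [], cells, assigned => (cells, assigned)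
  | fuel + 1, c :: rest, cells, assigned =>
    let st := dirs4.foldl (nbrB grid cols lines key c.1 c.2) (assigned, rest)
    bfsB grid cols lines key fuel st.2 (PySem.Set.add cells c) st.1

def find_cost_alt (grid : List String) : Int :=
  let cols : Int := grid.length
  let lines : Int := match PySem.List.pyGet? grid 0 with
    | some s => PySem.Str.len s
    | none => 0   -- Python raises IndexError on an empty grid: excluded by Pre_
  let fuel : Nat := cols.toNat * lines.toNat + 2
  let st := (PySem.List.pyRange 0 cols 1).foldl (fun st c =>
    (PySem.List.pyRange 0 lines 1).foldl (fun st l =>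
      if PySem.Set.contains st.1 (c, l) then st
      else
        let key := gIdx grid c l
        let assigned := PySem.Set.add st.1 (c, l)
        let (cells, assigned) := bfsB grid cols lines key fuel [(c, l)] PySem.Set.empty assigned
        let area : Int := PySem.Set.len cells
        let sides : Int := cells.foldl (fun acc cell =>
          acc + dirs4.foldl (fun acc2 d =>
            if blockedB grid cols lines (cell.1 + d.1) (cell.2 + d.2) key then
              let p := if d.2 == 0 then (cell.1, cell.2 - 1) else (cell.1 - 1, cell.2)
              if p ∈ cells ∧ blockedB grid cols lines (p.1 + d.1) (p.2 + d.2) key then acc2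
              else acc2 + 1
            else acc2) 0) 0
        (assigned, st.2 + area * sides)) st) ((PySem.Set.empty : PySem.Set (Int × Int)), (0 : Int))
  st.2

-- ===== PRECONDITION & SPEC =====
-- Pre_ excludes inputs where Python A raises: the empty grid (IndexError on grid[0]) and
-- ragged grids with a row shorter than row 0 (IndexError on grid[c][l]).
def Pre_find_cost (grid : List String) : Prop :=
  grid ≠ [] ∧ ∀ s ∈ grid, (grid.headI).toList.length ≤ s.toList.length
instance (grid : List String) : Decidable (Pre_find_cost grid) := by
  unfold Pre_find_cost; infer_instance

def pvWitness_find_cost : List String := ["AAB", "ABB"]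

def Spec_find_cost (grid : List String) (out : Int) : Prop := out = find_cost_alt grid
instance (grid : List String) (out : Int) : Decidable (Spec_find_cost grid out) := by
  unfold Spec_find_cost; infer_instance

-- ===== CLAIM (what is proved, stated in full; the proofs are below) =====
def Claim_equal_find_cost : Prop :=
  ∀ (grid : List String), Dom_find_cost grid → Pre_find_cost grid →
    Spec_find_cost grid (find_cost grid)

-- ===== LEMMAS AND PROOFS =====

-- runCount on a strictly increasing list counts the elements whose predecessor is absent
theorem runCount_main : ∀ n : Nat,
    (∀ s : List Int, s.length ≤ n → s.Pairwise (· < ·) →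
      runCount s = (s.countP (fun x => !decide ((x - 1) ∈ s)) : Int)) ∧
    (∀ (r : List Int) (c : Int), r.length ≤ n → r.Pairwise (· < ·) → (∀ x ∈ r, c ≤ x) →
      runCount (skipRun c r) =
        (r.countP (fun x => !decide ((x - 1) ∈ r) && !decide (x = c)) : Int)) := by
  intro n
  induction n with
  | zero =>
    constructor
    · intro s hl _; rw [List.length_eq_zero_iff.mp (Nat.le_zero.mp hl)]; simp [runCount]
    · intro r c hl _ _; rw [List.length_eq_zero_iff.mp (Nat.le_zero.mp hl)]
      simp [runCount, skipRun]
  | succ n ih =>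
    have M : ∀ s : List Int, s.length ≤ n + 1 → s.Pairwise (· < ·) →
        runCount s = (s.countP (fun x => !decide ((x - 1) ∈ s)) : Int) := by
      intro s hl hp
      match s with
      | [] => simp [runCount]
      | v :: rest =>
        have hlt : ∀ x ∈ rest, v < x := by
          intro x hx; exact (List.pairwise_cons.mp hp).1 x hx
        have h2 : runCount (skipRun (v + 1) rest) =
            (rest.countP (fun x => !decide ((x - 1) ∈ rest) && !decide (x = v + 1)) : Int) := by
          apply ih.2 rest (v + 1) (by simpa using Nat.lt_succ_iff.mp (Nat.lt_of_lt_of_le (Nat.lt_succ_of_le (Nat.le_refl _)) hl)) ((List.pairwise_cons.mp hp).2)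
          intro x hx; have := hlt x hx; omega
        have hcong : rest.countP (fun x => !decide ((x - 1) ∈ rest) && !decide (x = v + 1)) =
            rest.countP (fun x => !decide ((x - 1) ∈ v :: rest)) := by
          apply List.countP_congr
          intro x hx
          have hvx := hlt x hx
          by_cases hm : (x - 1) ∈ rest
          · simp [hm]
          · by_cases he : x = v + 1 <;> simp [hm, he, List.mem_cons] <;> omega
        have hv : v - 1 ∉ v :: rest := by
          intro hmem
          rcases List.mem_cons.mp hmem with h | h
          · omega
          · have := hlt _ h; omega
        rw [show runCount (v :: rest) = 1 + runCount (skipRun (v + 1) rest) from by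
          simp [runCount]]
        rw [h2, hcong, List.countP_cons]
        simp [hv]
        ring
    refine ⟨M, ?_⟩
    intro r c hl hp hc
    match r with
    | [] => simp [runCount, skipRun]
    | u :: t =>
      have hut : ∀ x ∈ t, u < x := by
        intro x hx; exact (List.pairwise_cons.mp hp).1 x hx
      rw [show skipRun c (u :: t) = if u == c then skipRun (c + 1) t else u :: t from rfl]
      by_cases huc : u = c
      · rw [if_pos (by simpa using huc)]
        have h2 : runCount (skipRun (c + 1) t) =
            (t.countP (fun x => !decide ((x - 1) ∈ t) && !decide (x = c + 1)) : Int) := by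
          apply ih.2 t (c + 1) (by simpa using Nat.lt_succ_iff.mp (Nat.lt_of_lt_of_le (Nat.lt_succ_of_le (Nat.le_refl _)) hl)) ((List.pairwise_cons.mp hp).2)
          intro x hx; have := hut x hx; omega
        rw [h2]
        have hcong2 : t.countP (fun x => !decide ((x - 1) ∈ u :: t) && !decide (x = c)) =
            t.countP (fun x => !decide ((x - 1) ∈ t) && !decide (x = c + 1)) := by
          apply List.countP_congr
          intro x hx
          have hux := hut x hx
          by_cases hm : (x - 1) ∈ t
          · simp [hm]
          · by_cases he : x = c + 1 <;> simp [hm, he, List.mem_cons, huc] <;> omega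
        rw [List.countP_cons, hcong2]
        simp [huc]
      · rw [if_neg (by simpa using huc)]
        rw [M (u :: t) hl hp]
        congr 1
        apply List.countP_congr
        intro x hx
        have hxc : x ≠ c := by
          rcases List.mem_cons.mp hx with h | h
          · omega
          · have h1 := hut x h; have h2 := hc u (List.mem_cons_self); omega
        simp [hxc]

theorem runCount_eq (s : List Int) (hs : s.Pairwise (· < ·)) :
    runCount s = (s.countP (fun x => !decide ((x - 1) ∈ s)) : Int) :=
  (runCount_main s.length).1 s (Nat.le_refl _) hs

theorem ccbsStep_x_eq (G : PySem.Dict Int (PySem.Set Int)) (b : Int × Int) :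
    ccbsStep "x" G b = G.insert b.1 (PySem.Set.add (G.getD b.1 []) b.2) := by
  by_cases h : G.contains b.1 = true
  · simp [ccbsStep, h]
  · simp only [ccbsStep]
    norm_num [h]
    rw [PySem.Dict.insert_insert_self,
      PySem.Dict.getD_of_not_contains G _ (by simpa using h)]
    rfl

theorem ccbsStep_y_eq (G : PySem.Dict Int (PySem.Set Int)) (b : Int × Int) :
    ccbsStep "y" G b = ccbsStep "x" G (b.2, b.1) := by
  simp [ccbsStep]

def valsX (U : List (Int × Int)) (c : Int) : List Int :=
  (U.filter (fun b => b.1 == c)).map (·.2)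

theorem groups_spec (U : List (Int × Int)) :
    (U.foldl (ccbsStep "x") PySem.Dict.empty).keys = PySem.Set.ofList (U.map (·.1)) ∧
    ∀ c : Int, (U.foldl (ccbsStep "x") PySem.Dict.empty).getD c [] =
      PySem.Set.ofList (valsX U c) := by
  induction U using List.reverseRecOn with
  | nil => constructor <;> simp [valsX, PySem.Set.ofList_nil]
  | append_singleton U b ih =>
    rw [List.foldl_append]
    simp only [List.foldl_cons, List.foldl_nil, ccbsStep_x_eq]
    obtain ⟨ihk, ihg⟩ := ih
    constructor
    · by_cases h : (U.foldl (ccbsStep "x") PySem.Dict.empty).contains b.1 = true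
      · rw [PySem.Dict.keys_insert_of_contains _ _ h]
        have hb : b.1 ∈ U.map (·.1) := by
          have := (PySem.Dict.contains_iff_mem_keys _ _).mp h
          rw [ihk] at this
          exact (PySem.Set.mem_ofList _ _).mp this
        rw [ihk, List.map_append]
        simp [PySem.Set.ofList_append_singleton, PySem.Set.add_of_mem,
          (PySem.Set.mem_ofList _ _).mpr hb]
      · rw [PySem.Dict.keys_insert_of_not_contains _ _ (by simpa using h)]
        have hb : b.1 ∉ U.map (·.1) := by
          intro hmem
          exact absurd ((PySem.Dict.contains_iff_mem_keys _ _).mpr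
            (by rw [ihk]; exact (PySem.Set.mem_ofList _ _).mpr hmem)) (by simpa using h)
        rw [ihk, List.map_append]
        show _ = PySem.Set.ofList (List.map (fun x => x.1) U ++ [b.1])
        rw [PySem.Set.ofList_append_singleton,
          PySem.Set.add_of_not_mem ((PySem.Set.mem_ofList _ _).not.mpr hb)]
    · intro c
      rw [PySem.Dict.getD_insert]
      have hvals : valsX (U ++ [b]) c =
          valsX U c ++ (if b.1 = c then [b.2] else []) := by
        simp only [valsX, List.filter_append, List.map_append]
        congr 1
        by_cases h : b.1 = c <;> simp [h]
      by_cases h : c = b.1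
      · rw [if_pos h, hvals, if_pos h.symm, PySem.Set.ofList_append_singleton, ihg, h]
      · rw [if_neg h, hvals, if_neg (fun hh => h hh.symm)]
        simp [ihg]

theorem countP_split (U : List (Int × Int)) (p q r : Int × Int → Bool)
    (h : ∀ b, ¬(q b = true ∧ r b = true)) :
    U.countP (fun b => p b && (q b || r b)) =
      U.countP (fun b => p b && q b) + U.countP (fun b => p b && r b) := by
  induction U with
  | nil => simp
  | cons a t ih =>
    simp only [List.countP_cons, ih]
    have := h a
    by_cases hq : q a = true <;> by_cases hr : r a = true <;>
      by_cases hp : p a = true <;> simp [hp, hq, hr] at * <;> omega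

theorem countP_partition (K : List Int) (hK : K.Nodup) (U : List (Int × Int))
    (p : Int × Int → Bool) :
    (K.map (fun c => U.countP (fun b => p b && b.1 == c))).sum
      = U.countP (fun b => p b && decide (b.1 ∈ K)) := by
  induction K with
  | nil => simp
  | cons c K' ih =>
    simp only [List.map_cons, List.sum_cons, ih (List.nodup_cons.mp hK).2]
    have hsplit := countP_split U p (fun b => b.1 == c) (fun b => decide (b.1 ∈ K'))
      (by
        intro b hb
        exact (List.nodup_cons.mp hK).1 (by
          have : b.1 = c := by simpa using hb.1
          simpa [this] using hb.2))
    have : (fun b => p b && decide (b.1 ∈ c :: K')) =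
        (fun b : Int × Int => p b && (b.1 == c || decide (b.1 ∈ K'))) := by
      funext b
      congr 1
      by_cases hbc : b.1 = c <;> simp [hbc, List.mem_cons]
    rw [this, hsplit]

theorem valsX_nodup (U : List (Int × Int)) (hU : U.Nodup) (c : Int) :
    (valsX U c).Nodup := by
  apply List.Nodup.map_on _ (hU.filter _)
  intro x hx y hy hxy
  have hx1 : x.1 = c := by simpa using (List.mem_filter.mp hx).2
  have hy1 : y.1 = c := by simpa using (List.mem_filter.mp hy).2
  exact Prod.ext (hx1.trans hy1.symm) hxy

theorem mem_valsX (U : List (Int × Int)) (c w : Int) :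
    w ∈ valsX U c ↔ (c, w) ∈ U := by
  simp only [valsX, List.mem_map, List.mem_filter]
  constructor
  · rintro ⟨b, ⟨hb, hb1⟩, hb2⟩
    have : b = (c, w) := Prod.ext (by simpa using hb1) hb2
    rwa [this] at hb
  · intro h
    exact ⟨(c, w), ⟨h, by simp⟩, rfl⟩

theorem sum_map_natcast {α : Type} (l : List α) (f : α → Nat) :
    (l.map (fun x => (f x : Int))).sum = ((l.map f).sum : Int) := by
  induction l with
  | nil => simp
  | cons a t ih => simp [ih]

theorem ccbs_x (U : List (Int × Int)) (hU : U.Nodup) :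
    count_consecutive_block_series U "x" =
      (U.countP (fun b => !decide ((b.1, b.2 - 1) ∈ U)) : Int) := by
  obtain ⟨hk, hg⟩ := groups_spec U
  have hnk : (U.foldl (ccbsStep "x") PySem.Dict.empty).keys.Nodup := by
    rw [hk]; exact PySem.Set.nodup_ofList _
  unfold count_consecutive_block_series
  show (((U.foldl (ccbsStep "x") PySem.Dict.empty).items).foldl
      (fun acc kv => acc + runCount (PySem.List.sorted kv.2 (fun x => x) false)) 0) = _
  rw [show ∀ l : List (Int × PySem.Set Int),
      l.foldl (fun acc kv => acc + runCount (PySem.List.sorted kv.2 (fun x => x) false)) 0 =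
        0 + (l.map (fun kv => runCount (PySem.List.sorted kv.2 (fun x => x) false))).sum from
      fun l => PySem.List.foldl_add l _ 0,
    PySem.Dict.items_eq_map_keys _ hnk [], List.map_map, hk, zero_add]
  have key_lem : ∀ c : Int,
      runCount (PySem.List.sorted (PySem.Set.ofList (valsX U c)) (fun x => x) false) =
        (U.countP (fun b => !decide ((b.1, b.2 - 1) ∈ U) && (b.1 == c)) : Int) := by
    intro c
    rw [runCount_eq _ (PySem.List.sorted_ofList_pairwise_lt _)]
    have h1 : (PySem.List.sorted (PySem.Set.ofList (valsX U c)) (fun x => x) false).countP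
          (fun x => !decide ((x - 1) ∈ PySem.List.sorted (PySem.Set.ofList (valsX U c)) (fun x => x) false))
        = (PySem.List.sorted (PySem.Set.ofList (valsX U c)) (fun x => x) false).countP
          (fun x => !decide ((x - 1) ∈ valsX U c)) := by
      apply List.countP_congr
      intro x _
      by_cases hm : (x - 1) ∈ valsX U c
      · simp [PySem.List.mem_sorted, PySem.Set.mem_ofList, hm]
      · simp [PySem.List.mem_sorted, PySem.Set.mem_ofList, hm]
    rw [h1, List.Perm.countP_eq _ (PySem.List.sorted_perm _ _ _),
      PySem.Set.ofList_eq_self_of_nodup _ (valsX_nodup U hU c)]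
    have h2 : (valsX U c).countP (fun x => !decide ((x - 1) ∈ valsX U c))
        = (U.filter (fun b => b.1 == c)).countP
            (fun b => !decide ((b.1, b.2 - 1) ∈ U)) := by
      rw [valsX, List.countP_map]
      apply List.countP_congr
      intro b hb
      have hb1 : b.1 = c := by simpa using (List.mem_filter.mp hb).2
      simp only [Function.comp]
      by_cases hm : (b.1, b.2 - 1) ∈ U
      · have h3 : (b.2 - 1) ∈ valsX U c :=
          (mem_valsX U c (b.2 - 1)).mpr (by rw [← hb1]; exact hm)
        simp [hm]
        rw [← hb1]; exact hm
      · have h3 : (b.2 - 1) ∉ valsX U c := fun hh =>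
          hm (by rw [hb1]; exact (mem_valsX U c (b.2 - 1)).mp hh)
        simp [hm]
        intro hcm
        exact hm (by rw [hb1]; exact hcm)
    rw [h2, List.countP_filter]
  have hmapped : (PySem.Set.ofList (U.map (·.1))).map
        ((fun kv : Int × PySem.Set Int => runCount (PySem.List.sorted kv.2 (fun x => x) false)) ∘
          (fun k => (k, (U.foldl (ccbsStep "x") PySem.Dict.empty).getD k [])))
      = (PySem.Set.ofList (U.map (·.1))).map
        (fun c => (U.countP (fun b => !decide ((b.1, b.2 - 1) ∈ U) && (b.1 == c)) : Int)) := by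
    apply List.map_congr_left
    intro c _
    simp only [Function.comp]
    rw [hg c, key_lem c]
  rw [hmapped, sum_map_natcast, countP_partition _ (PySem.Set.nodup_ofList _) U _]
  have : U.countP (fun b => !decide ((b.1, b.2 - 1) ∈ U) &&
      decide (b.1 ∈ PySem.Set.ofList (U.map (·.1)))) = U.countP (fun b => !decide ((b.1, b.2 - 1) ∈ U)) := by
    apply List.countP_congr
    intro b hb
    have : b.1 ∈ PySem.Set.ofList (U.map (·.1)) :=
      (PySem.Set.mem_ofList _ _).mpr (List.mem_map.mpr ⟨b, hb, rfl⟩)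
    simp [this]
  rw [this]

theorem ccbs_y (U : List (Int × Int)) (hU : U.Nodup) :
    count_consecutive_block_series U "y" =
      (U.countP (fun b => !decide ((b.1 - 1, b.2) ∈ U)) : Int) := by
  have hstep : ccbsStep "y" = fun G b => ccbsStep "x" G (b.2, b.1) :=
    funext fun G => funext fun b => ccbsStep_y_eq G b
  have hswap : count_consecutive_block_series U "y" =
      count_consecutive_block_series (U.map (fun b => (b.2, b.1))) "x" := by
    unfold count_consecutive_block_series
    rw [List.foldl_map, hstep]
  have hinj : Function.Injective (fun b : Int × Int => (b.2, b.1)) := by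
    intro a b h
    cases a; cases b
    simpa [Prod.ext_iff, and_comm] using h
  rw [hswap, ccbs_x _ (hU.map hinj), List.countP_map]
  congr 1
  apply List.countP_congr
  intro b hb
  have : ((fun b : Int × Int => (b.2, b.1)) b).2 - 1 = b.1 - 1 := rfl
  by_cases hm : (b.1 - 1, b.2) ∈ U
  · simp [Function.comp, List.mem_map.mpr ⟨(b.1 - 1, b.2), hm, rfl⟩, hm]
  · have hnm : ((b.2, b.1 - 1) : Int × Int) ∉ U.map (fun b => (b.2, b.1)) := by
      intro hmem
      obtain ⟨a, ha, haeq⟩ := List.mem_map.mp hmem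
      cases a
      simp only [Prod.mk.injEq] at haeq
      exact hm (by rw [haeq.1, haeq.2] at ha; exact ha)
    simp [Function.comp, hnm, hm]

def mkEB (u d l r : List (Int × Int)) : PySem.Dict String (List (Int × Int)) :=
  PySem.Dict.ofList [("up", u), ("down", d), ("left", l), ("right", r)]

theorem mkEB_up (u d l r : List (Int × Int)) : (mkEB u d l r).getD "up" [] = u := rfl
theorem mkEB_down (u d l r : List (Int × Int)) : (mkEB u d l r).getD "down" [] = d := rfl
theorem mkEB_left (u d l r : List (Int × Int)) : (mkEB u d l r).getD "left" [] = l := rfl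
theorem mkEB_right (u d l r : List (Int × Int)) : (mkEB u d l r).getD "right" [] = r := rfl
theorem mkEB_ins_up (u d l r v : List (Int × Int)) :
    (mkEB u d l r).insert "up" v = mkEB v d l r := rfl
theorem mkEB_ins_down (u d l r v : List (Int × Int)) :
    (mkEB u d l r).insert "down" v = mkEB u v l r := rfl
theorem mkEB_ins_left (u d l r v : List (Int × Int)) :
    (mkEB u d l r).insert "left" v = mkEB u d v r := rfl
theorem mkEB_ins_right (u d l r v : List (Int × Int)) :
    (mkEB u d l r).insert "right" v = mkEB u d l v := rfl
theorem eb0_eq : eb0 = mkEB [] [] [] [] := rfl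

def expo (grid : List String) (cols lines : Int) (key : Option Char) (d : Int × Int)
    (c : Int × Int) : Bool :=
  blockedB grid cols lines (c.1 + d.1) (c.2 + d.2) key

theorem dirStep (grid : List String) (cols lines : Int) (key : Option Char)
    (dirs : List String) (nx ny : Int) (s : String) :
    (if nx < 0 ∨ nx ≥ cols ∨ ny < 0 ∨ ny ≥ lines then dirs ++ [s]
     else if 0 ≤ nx ∧ nx < cols ∧ 0 ≤ ny ∧ ny < lines then
       (if gIdx grid nx ny ≠ key then dirs ++ [s] else dirs)
     else dirs)
    = dirs ++ (if blockedB grid cols lines nx ny key then [s] else []) := by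
  by_cases hin : 0 ≤ nx ∧ nx < cols ∧ 0 ≤ ny ∧ ny < lines
  · have h1 : ¬(nx < 0 ∨ nx ≥ cols ∨ ny < 0 ∨ ny ≥ lines) := by omega
    by_cases hne : gIdx grid nx ny = key
    · simp [h1, hin, hne, blockedB]
    · simp [h1, hin, hne, blockedB]
  · have h1 : nx < 0 ∨ nx ≥ cols ∨ ny < 0 ∨ ny ≥ lines := by omega
    simp [h1, hin, blockedB]

theorem externDirections_eq (grid : List String) (cols lines : Int) (key : Option Char)
    (c : Int × Int) :
    externDirections grid cols lines key c =
      (if expo grid cols lines key (-1, 0) c then ["up"] else []) ++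
      (if expo grid cols lines key (1, 0) c then ["down"] else []) ++
      (if expo grid cols lines key (0, -1) c then ["right"] else []) ++
      (if expo grid cols lines key (0, 1) c then ["left"] else []) := by
  unfold externDirections dirs4
  simp only [List.foldl_cons, List.foldl_nil]
  rw [dirStep, dirStep, dirStep, dirStep]
  have g1 : get_direction (-1) 0 = "up" := by decide
  have g2 : get_direction 1 0 = "down" := by decide
  have g3 : get_direction 0 (-1) = "right" := by decide
  have g4 : get_direction 0 1 = "left" := by decide
  simp only [g1, g2, g3, g4, expo]
  simp [List.append_assoc]

theorem externCell_eq (grid : List String) (cols lines : Int) (key : Option Char)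
    (u d l r : List (Int × Int)) (c : Int × Int)
    (hu : c ∉ u) (hd : c ∉ d) (hl : c ∉ l) (hr : c ∉ r) :
    externCell grid cols lines key (mkEB u d l r) c =
      mkEB (u ++ if expo grid cols lines key (-1, 0) c then [c] else [])
           (d ++ if expo grid cols lines key (1, 0) c then [c] else [])
           (l ++ if expo grid cols lines key (0, 1) c then [c] else [])
           (r ++ if expo grid cols lines key (0, -1) c then [c] else []) := by
  unfold externCell
  rw [externDirections_eq]
  by_cases bU : expo grid cols lines key (-1, 0) c <;>
    by_cases bD : expo grid cols lines key (1, 0) c <;>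
      by_cases bR : expo grid cols lines key (0, -1) c <;>
        by_cases bL : expo grid cols lines key (0, 1) c <;>
          simp [bU, bD, bR, bL, mkEB_up, mkEB_down, mkEB_left, mkEB_right,
            mkEB_ins_up, mkEB_ins_down, mkEB_ins_left, mkEB_ins_right,
            hu, hd, hl, hr]

theorem not_mem_app_ite {α : Type} (x c : α) (u : List α) (b : Bool)
    (hx : x ∉ u) (hne : x ≠ c) : x ∉ u ++ (if b then [c] else []) := by
  cases b <;> simp [hx, hne]

theorem app_ite_filter {α : Type} (u : List α) (c : α) (E' : List α) (p : α → Bool) :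
    (u ++ if p c then [c] else []) ++ E'.filter p = u ++ (c :: E').filter p := by
  by_cases h : p c <;> simp [h]

theorem externLoop_eq (grid : List String) (cols lines : Int) (key : Option Char) :
    ∀ (E : List (Int × Int)) (u d l r : List (Int × Int)), E.Nodup →
      (∀ c ∈ E, c ∉ u ∧ c ∉ d ∧ c ∉ l ∧ c ∉ r) →
      externLoop grid cols lines key E (mkEB u d l r) =
        mkEB (u ++ E.filter (expo grid cols lines key (-1, 0)))
             (d ++ E.filter (expo grid cols lines key (1, 0)))
             (l ++ E.filter (expo grid cols lines key (0, 1)))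
             (r ++ E.filter (expo grid cols lines key (0, -1))) := by
  intro E
  induction E with
  | nil => intro u d l r _ _; simp [externLoop]
  | cons c E' ih =>
    intro u d l r hnd hdisj
    obtain ⟨hc, hE'⟩ := List.nodup_cons.mp hnd
    obtain ⟨hu, hd, hl, hr⟩ := hdisj c List.mem_cons_self
    show externLoop grid cols lines key E' (externCell grid cols lines key (mkEB u d l r) c) = _
    rw [externCell_eq grid cols lines key u d l r c hu hd hl hr]
    rw [ih _ _ _ _ hE' ?_]
    · rw [app_ite_filter, app_ite_filter, app_ite_filter, app_ite_filter]
    · intro c' hc'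
      have hne : c' ≠ c := fun h => hc (h ▸ hc')
      obtain ⟨h1, h2, h3, h4⟩ := hdisj c' (List.mem_cons_of_mem _ hc')
      refine ⟨not_mem_app_ite _ _ _ _ h1 hne, not_mem_app_ite _ _ _ _ h2 hne,
        not_mem_app_ite _ _ _ _ h3 hne, not_mem_app_ite _ _ _ _ h4 hne⟩

def pdir (d c : Int × Int) : Int × Int :=
  if d.2 == 0 then (c.1, c.2 - 1) else (c.1 - 1, c.2)

def tdir (grid : List String) (cols lines : Int) (key : Option Char)
    (E : List (Int × Int)) (d c : Int × Int) : Int :=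
  if blockedB grid cols lines (c.1 + d.1) (c.2 + d.2) key then
    (if pdir d c ∈ E ∧
        blockedB grid cols lines ((pdir d c).1 + d.1) ((pdir d c).2 + d.2) key then 0 else 1)
  else 0

theorem inner_eq (grid : List String) (cols lines : Int) (key : Option Char)
    (E : List (Int × Int)) (cell : Int × Int) :
    dirs4.foldl (fun acc2 d =>
      if blockedB grid cols lines (cell.1 + d.1) (cell.2 + d.2) key then
        let p := if d.2 == 0 then (cell.1, cell.2 - 1) else (cell.1 - 1, cell.2)
        if p ∈ E ∧ blockedB grid cols lines (p.1 + d.1) (p.2 + d.2) key then acc2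
        else acc2 + 1
      else acc2) 0
    = tdir grid cols lines key E (-1, 0) cell + tdir grid cols lines key E (1, 0) cell
      + tdir grid cols lines key E (0, -1) cell + tdir grid cols lines key E (0, 1) cell := by
  simp only [dirs4, List.foldl_cons, List.foldl_nil, tdir, pdir]
  norm_num
  split_ifs <;> ring

theorem tdir_ite (grid : List String) (cols lines : Int) (key : Option Char)
    (E : List (Int × Int)) (d c : Int × Int) :
    tdir grid cols lines key E d c =
      if (fun c => blockedB grid cols lines (c.1 + d.1) (c.2 + d.2) key &&
          !(decide (pdir d c ∈ E) &&
            blockedB grid cols lines ((pdir d c).1 + d.1) ((pdir d c).2 + d.2) key)) c = true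
      then 1 else 0 := by
  unfold tdir
  by_cases h1 : blockedB grid cols lines (c.1 + d.1) (c.2 + d.2) key = true <;>
    by_cases h2 : pdir d c ∈ E <;>
      by_cases h3 : blockedB grid cols lines ((pdir d c).1 + d.1) ((pdir d c).2 + d.2) key = true <;>
        simp [h1, h2, h3]

theorem tdir_sum (grid : List String) (cols lines : Int) (key : Option Char)
    (E F : List (Int × Int)) (d : Int × Int) :
    (F.map (tdir grid cols lines key E d)).sum =
      (F.countP (fun c => blockedB grid cols lines (c.1 + d.1) (c.2 + d.2) key &&
          !(decide (pdir d c ∈ E) &&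
            blockedB grid cols lines ((pdir d c).1 + d.1) ((pdir d c).2 + d.2) key)) : Int) := by
  rw [← PySem.List.sum_map_ite_one_zero]
  congr 1
  apply List.map_congr_left
  intro c _
  exact tdir_ite grid cols lines key E d c

theorem dirA_x (grid : List String) (cols lines : Int) (key : Option Char)
    (E : List (Int × Int)) (hE : E.Nodup) (d : Int × Int) :
    count_consecutive_block_series (E.filter (expo grid cols lines key d)) "x" =
      (E.countP (fun c => expo grid cols lines key d c &&
        !(decide ((c.1, c.2 - 1) ∈ E) && expo grid cols lines key d (c.1, c.2 - 1))) : Int) := by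
  rw [ccbs_x _ (hE.filter _)]
  congr 1
  rw [List.countP_filter]
  apply List.countP_congr
  intro b _
  by_cases he : expo grid cols lines key d b = true <;>
    by_cases hm : (b.1, b.2 - 1) ∈ E <;>
      by_cases hp : expo grid cols lines key d (b.1, b.2 - 1) = true <;>
        simp [List.mem_filter, he, hm, hp]

theorem dirA_y (grid : List String) (cols lines : Int) (key : Option Char)
    (E : List (Int × Int)) (hE : E.Nodup) (d : Int × Int) :
    count_consecutive_block_series (E.filter (expo grid cols lines key d)) "y" =
      (E.countP (fun c => expo grid cols lines key d c &&
        !(decide ((c.1 - 1, c.2) ∈ E) && expo grid cols lines key d (c.1 - 1, c.2))) : Int) := by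
  rw [ccbs_y _ (hE.filter _)]
  congr 1
  rw [List.countP_filter]
  apply List.countP_congr
  intro b _
  by_cases he : expo grid cols lines key d b = true <;>
    by_cases hm : (b.1 - 1, b.2) ∈ E <;>
      by_cases hp : expo grid cols lines key d (b.1 - 1, b.2) = true <;>
        simp [List.mem_filter, he, hm, hp]

theorem nbrBA (grid : List String) (cols lines : Int) (key : Option Char) (x y : Int)
    (st : List (Int × Int) × List (Int × Int)) (d : Int × Int) :
    nbrB grid cols lines key x y st d = nbrA grid cols lines key x y st d := by
  unfold nbrA nbrB
  by_cases hin : 0 ≤ x + d.1 ∧ x + d.1 < cols ∧ 0 ≤ y + d.2 ∧ y + d.2 < lines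
  · by_cases hkey : gIdx grid (x + d.1) (y + d.2) == key
    · by_cases hmem : (x + d.1, y + d.2) ∈ st.1
      · simp [hin, hkey, hmem]
      · simp [hin, hkey, hmem]
    · simp [hin, hkey]
  · simp [hin]

-- invariant of the neighbour scan: visited ++ queue stays duplicate-free and assigned
theorem nbrA_inv_step (grid : List String) (cols lines : Int) (key : Option Char) (x y : Int)
    (endr : List (Int × Int)) (st : List (Int × Int) × List (Int × Int)) (d : Int × Int)
    (h1 : (endr ++ st.2).Nodup) (h2 : ∀ z ∈ endr ++ st.2, z ∈ st.1) :
    (endr ++ (nbrA grid cols lines key x y st d).2).Nodup ∧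
      ∀ z ∈ endr ++ (nbrA grid cols lines key x y st d).2,
        z ∈ (nbrA grid cols lines key x y st d).1 := by
  simp only [nbrA]
  by_cases hin : 0 ≤ x + d.1 ∧ x + d.1 < cols ∧ 0 ≤ y + d.2 ∧ y + d.2 < lines
  · by_cases hcond : (gIdx grid (x + d.1) (y + d.2) == key) = true ∧ (x + d.1, y + d.2) ∉ st.1
    · rw [if_pos hin, if_pos hcond]
      have hnm : (x + d.1, y + d.2) ∉ endr ++ st.2 := fun hmem => hcond.2 (h2 _ hmem)
      constructor
      · rw [← List.append_assoc, List.nodup_append]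
        refine ⟨h1, by simp, ?_⟩
        intro z hz w hw
        rw [List.mem_singleton] at hw
        subst hw
        exact fun hzw => hnm (hzw ▸ hz)
      · intro z hz
        rw [← List.append_assoc] at hz
        rcases List.mem_append.mp hz with hz | hz
        · exact List.mem_append_left _ (h2 _ hz)
        · exact List.mem_append_right _ hz
    · rw [if_pos hin, if_neg hcond]; exact ⟨h1, h2⟩
  · rw [if_neg hin]; exact ⟨h1, h2⟩

theorem nbr_inv (grid : List String) (cols lines : Int) (key : Option Char) (x y : Int)
    (endr : List (Int × Int)) :
    ∀ (ds : List (Int × Int)) (st : List (Int × Int) × List (Int × Int)),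
      (endr ++ st.2).Nodup → (∀ z ∈ endr ++ st.2, z ∈ st.1) →
      (endr ++ (ds.foldl (nbrA grid cols lines key x y) st).2).Nodup ∧
        (∀ z ∈ endr ++ (ds.foldl (nbrA grid cols lines key x y) st).2,
          z ∈ (ds.foldl (nbrA grid cols lines key x y) st).1) := by
  intro ds
  induction ds with
  | nil => intro st h1 h2; exact ⟨h1, h2⟩
  | cons d ds ih =>
    intro st h1 h2
    simp only [List.foldl_cons]
    obtain ⟨h1', h2'⟩ := nbrA_inv_step grid cols lines key x y endr st d h1 h2
    exact ih _ h1' h2'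

theorem bfs_eq (grid : List String) (cols lines : Int) (key : Option Char) :
    ∀ (fuel : Nat) (q endr asg : List (Int × Int)),
      (endr ++ q).Nodup → (∀ z ∈ endr ++ q, z ∈ asg) →
      bfsB grid cols lines key fuel q endr asg = bfsA grid cols lines key fuel q endr asg ∧
        (bfsA grid cols lines key fuel q endr asg).1.Nodup := by
  intro fuel
  induction fuel with
  | zero =>
    intro q endr asg h1 _
    exact ⟨rfl, (h1.sublist (List.sublist_append_left _ _))⟩
  | succ fuel ih =>
    intro q endr asg h1 h2
    match q with
    | [] =>
      exact ⟨rfl, (h1.sublist (List.sublist_append_left _ _))⟩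
    | c :: rest =>
      simp only [bfsA, bfsB]
      have hstep : nbrB grid cols lines key c.1 c.2 = nbrA grid cols lines key c.1 c.2 :=
        funext fun st => funext fun d => nbrBA grid cols lines key c.1 c.2 st d
      rw [hstep]
      have hcnm : c ∉ endr := by
        intro hmem
        exact (List.disjoint_of_nodup_append h1) hmem List.mem_cons_self
      rw [PySem.Set.add_of_not_mem hcnm]
      have heq : (endr ++ [c]) ++ rest = endr ++ c :: rest := by
        rw [List.append_assoc]; rfl
      have h1' : ((endr ++ [c]) ++ rest).Nodup := by rw [heq]; exact h1
      have h2' : ∀ z ∈ (endr ++ [c]) ++ rest, z ∈ asg := by rw [heq]; exact h2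
      obtain ⟨hnd, hmem⟩ :=
        nbr_inv grid cols lines key c.1 c.2 (endr ++ [c]) dirs4 (asg, rest) h1' h2'
      exact ih _ _ _ hnd hmem

theorem sides_eq (grid : List String) (cols lines : Int) (key : Option Char)
    (E : List (Int × Int)) (hE : E.Nodup) :
    count_consecutive_block_series ((externLoop grid cols lines key E eb0).getD "up" []) "x"
      + count_consecutive_block_series ((externLoop grid cols lines key E eb0).getD "down" []) "x"
      + count_consecutive_block_series ((externLoop grid cols lines key E eb0).getD "right" []) "y"
      + count_consecutive_block_series ((externLoop grid cols lines key E eb0).getD "left" []) "y"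
    = E.foldl (fun acc cell =>
        acc + dirs4.foldl (fun acc2 d =>
          if blockedB grid cols lines (cell.1 + d.1) (cell.2 + d.2) key then
            let p := if d.2 == 0 then (cell.1, cell.2 - 1) else (cell.1 - 1, cell.2)
            if p ∈ E ∧ blockedB grid cols lines (p.1 + d.1) (p.2 + d.2) key then acc2
            else acc2 + 1
          else acc2) 0) 0 := by
  rw [eb0_eq, externLoop_eq grid cols lines key E [] [] [] [] hE (by intro c _; simp)]
  simp only [mkEB_up, mkEB_down, mkEB_left, mkEB_right, List.nil_append]
  rw [dirA_x grid cols lines key E hE (-1, 0), dirA_x grid cols lines key E hE (1, 0),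
    dirA_y grid cols lines key E hE (0, -1), dirA_y grid cols lines key E hE (0, 1)]
  rw [show ∀ l : List (Int × Int),
      (l.foldl (fun (acc : Int) cell =>
        acc + dirs4.foldl (fun (acc2 : Int) d =>
          if blockedB grid cols lines (cell.1 + d.1) (cell.2 + d.2) key then
            let p := if d.2 == 0 then (cell.1, cell.2 - 1) else (cell.1 - 1, cell.2)
            if p ∈ E ∧ blockedB grid cols lines (p.1 + d.1) (p.2 + d.2) key then acc2
            else acc2 + 1
          else acc2) 0) 0)
      = 0 + (l.map (fun cell => dirs4.foldl (fun (acc2 : Int) d =>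
          if blockedB grid cols lines (cell.1 + d.1) (cell.2 + d.2) key then
            let p := if d.2 == 0 then (cell.1, cell.2 - 1) else (cell.1 - 1, cell.2)
            if p ∈ E ∧ blockedB grid cols lines (p.1 + d.1) (p.2 + d.2) key then acc2
            else acc2 + 1
          else acc2) 0)).sum from fun l => PySem.List.foldl_add l _ 0, zero_add]
  rw [List.map_congr_left (fun cell _ => inner_eq grid cols lines key E cell)]
  rw [PySem.List.sum_map_add_int, PySem.List.sum_map_add_int, PySem.List.sum_map_add_int]
  rw [tdir_sum, tdir_sum, tdir_sum, tdir_sum]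
  rfl

theorem outer_eq (grid : List String) (cols lines : Int) (fuel : Nat) :
    (((PySem.List.pyRange 0 cols 1).foldl (fun st c =>
        (PySem.List.pyRange 0 lines 1).foldl (fun st l =>
          if (c, l) ∈ st.1 then st
          else
            match bfsA grid cols lines (gIdx grid c l) fuel [(c, l)] [] (st.1 ++ [(c, l)]) with
            | (endr, assigned) =>
              (assigned, st.2 + (endr.length : Int) *
                (count_consecutive_block_series
                    ((externLoop grid cols lines (gIdx grid c l) endr eb0).getD "up" []) "x"
                  + count_consecutive_block_series
                    ((externLoop grid cols lines (gIdx grid c l) endr eb0).getD "down" []) "x"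
                  + count_consecutive_block_series
                    ((externLoop grid cols lines (gIdx grid c l) endr eb0).getD "right" []) "y"
                  + count_consecutive_block_series
                    ((externLoop grid cols lines (gIdx grid c l) endr eb0).getD "left" []) "y")))
          st) (([] : List (Int × Int)), (0 : Int))).2 : Int)
    = (((PySem.List.pyRange 0 cols 1).foldl (fun st c =>
        (PySem.List.pyRange 0 lines 1).foldl (fun st l =>
          if PySem.Set.contains st.1 (c, l) then st
          else
            match bfsB grid cols lines (gIdx grid c l) fuel [(c, l)] PySem.Set.empty
                (PySem.Set.add st.1 (c, l)) with
            | (cells, assigned) =>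
              (assigned, st.2 + PySem.Set.len cells *
                cells.foldl (fun acc cell =>
                  acc + dirs4.foldl (fun acc2 d =>
                    if blockedB grid cols lines (cell.1 + d.1) (cell.2 + d.2) (gIdx grid c l) then
                      let p := if d.2 == 0 then (cell.1, cell.2 - 1) else (cell.1 - 1, cell.2)
                      if p ∈ cells ∧
                          blockedB grid cols lines (p.1 + d.1) (p.2 + d.2) (gIdx grid c l) then
                        acc2
                      else acc2 + 1
                    else acc2) 0) 0))
          st) ((PySem.Set.empty : PySem.Set (Int × Int)), (0 : Int))).2 : Int) := by
  congr 1
  congr 1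
  funext st c
  congr 1
  funext st' l
  by_cases hmem : (c, l) ∈ st'.1
  · rw [if_pos hmem, if_pos ((PySem.Set.contains_iff _ _).mpr hmem)]
  · rw [if_neg hmem, if_neg (fun h => hmem ((PySem.Set.contains_iff _ _).mp h))]
    rw [PySem.Set.add_of_not_mem hmem]
    have h1 : (([] : List (Int × Int)) ++ [(c, l)]).Nodup := by simp
    have h2 : ∀ z ∈ ([] : List (Int × Int)) ++ [(c, l)], z ∈ st'.1 ++ [(c, l)] := by simp
    obtain ⟨hbfs, hnd⟩ := bfs_eq grid cols lines (gIdx grid c l) fuel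
      [(c, l)] [] (st'.1 ++ [(c, l)]) h1 h2
    have hbfs2 : bfsB grid cols lines (gIdx grid c l) fuel [(c, l)] PySem.Set.empty
        (st'.1 ++ [(c, l)]) =
        bfsA grid cols lines (gIdx grid c l) fuel [(c, l)] [] (st'.1 ++ [(c, l)]) := hbfs
    rw [hbfs2]
    rcases hE : bfsA grid cols lines (gIdx grid c l) fuel [(c, l)] [] (st'.1 ++ [(c, l)])
      with ⟨E, asg'⟩
    rw [hE] at hnd
    simp only at hnd
    show (asg', st'.2 + _) = (asg', st'.2 + _)
    have harea : ((E.length : Int)) = PySem.Set.len E := rfl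
    rw [sides_eq grid cols lines (gIdx grid c l) E hnd, harea]

theorem main_eq (grid : List String) : find_cost grid = find_cost_alt grid :=
  outer_eq grid (grid.length : Int)
    ((match PySem.List.pyGet? grid 0 with
      | some s => PySem.Str.len s
      | none => 0 : Int))
    ((grid.length : Int).toNat * ((match PySem.List.pyGet? grid 0 with
      | some s => PySem.Str.len s
      | none => 0 : Int)).toNat + 2)

-- ===== VERDICT (by name: the statement is the Claim_ definition above) =====
theorem find_cost_spec : Claim_equal_find_cost := by
  intro grid _ _
  unfold Spec_find_cost
  exact main_eq grid
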